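-- pv_equiv track=rewrite | github.com/yu1745/esp-rpc | generator/ts_emitter.py | _extract_custom_type_names
-- ===== SOURCE A (Python) =====
-- def _extract_custom_type_names(type_str: str) -> set[str]:
--     """从类型字符串中提取自定义类型名（用于按需导入）"""
--     builtin = {'int', 'int32', 'int64', 'uint32', 'uint64', 'bool', 'float', 'double', 'string'}
--     t = type_str.strip()
--     if t in builtin:
--         return set()
--     if t.startswith('OPTIONAL('):
--         return _extract_custom_type_names(t[9:-1])
--     if t.startswith('LIST('):
--         return _extract_custom_type_names(t[5:-1])
--     if t.startswith('REQUIRED('):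
--         return _extract_custom_type_names(t[9:-1])
--     return {t}
-- ===== SOURCE B (Python) =====
-- def _extract_custom_type_names(type_str: str) -> set[str]:
--     """Iterative peeling loop with a wrapper-prefix table instead of tail recursion."""
--     builtin = frozenset({'int', 'int32', 'int64', 'uint32', 'uint64',
--                          'bool', 'float', 'double', 'string'})
--     wrappers = {'OPTIONAL(': 9, 'LIST(': 5, 'REQUIRED(': 9}
--     t = type_str.strip()
--     while True:
--         if t in builtin:
--             return set()
--         for prefix, n in wrappers.items():
--             if t.startswith(prefix):
--                 t = t[n:-1].strip()
--                 break
--         else: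
--             return {t}
-- ===== Notes on version B (the rewrite author's own statement) =====
-- stated objective: alternative
-- what changed: Replaces A's tail recursion with an if-chain over three prefixes by an iterative while-loop that peels the innermost wrapper each round using a prefix->slice-length table looked up by first match.
import Mathlib
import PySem

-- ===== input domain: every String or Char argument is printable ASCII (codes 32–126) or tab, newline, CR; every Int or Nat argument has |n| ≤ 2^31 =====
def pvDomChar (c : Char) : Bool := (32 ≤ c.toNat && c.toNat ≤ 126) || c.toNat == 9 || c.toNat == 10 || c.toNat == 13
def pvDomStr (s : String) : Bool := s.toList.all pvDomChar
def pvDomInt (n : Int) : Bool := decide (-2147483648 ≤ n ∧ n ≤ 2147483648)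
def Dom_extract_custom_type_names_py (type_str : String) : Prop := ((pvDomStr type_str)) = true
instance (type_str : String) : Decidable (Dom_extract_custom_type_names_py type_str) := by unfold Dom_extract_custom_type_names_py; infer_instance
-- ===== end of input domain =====

-- B replaces A's tail recursion (an if-chain over three wrapper prefixes) by an iterative
-- peeling loop driven by a prefix -> slice-length table; same values, similar cost.

-- the builtin set literal and the three wrapper prefixes (shared string constants)
def pvBuiltinA : List (List Char) :=
  ["int".toList, "int32".toList, "int64".toList, "uint32".toList, "uint64".toList,
   "bool".toList, "float".toList, "double".toList, "string".toList]
def pvOpt : List Char := "OPTIONAL(".toList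
def pvList : List Char := "LIST(".toList
def pvReq : List Char := "REQUIRED(".toList

-- slicing t[n:-1] of a nonempty t shrinks; stripping never grows (termination of both ports)
theorem pvSliceLt (t : List Char) (n : Int) (h : 0 < t.length) :
    (PySem.List.slice t (some n) (some (-1))).length < t.length := by
  rw [PySem.List.length_slice, PySem.List.clampIdx_neg_one]
  omega

theorem pvStripLe (s : List Char) : (PySem.Chars.strip s).length ≤ s.length := by
  simp only [PySem.Chars.strip, PySem.Chars.rstrip, PySem.Chars.lstrip, List.length_reverse]
  calc (List.dropWhile PySem.Chars.isspace (List.dropWhile PySem.Chars.isspace s).reverse).length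
      ≤ (List.dropWhile PySem.Chars.isspace s).reverse.length := List.length_dropWhile_le _ _
    _ ≤ s.length := by simpa using List.length_dropWhile_le PySem.Chars.isspace s

-- ===== PORT A =====
-- recursive body of A on the code points
def pvGoA (s : List Char) : List String :=
  let t := PySem.Chars.strip s
  if pvBuiltinA.contains t then []
  else if h1 : PySem.Chars.startswith t pvOpt then
    pvGoA (PySem.Chars.slice t (some 9) (some (-1)))
  else if h2 : PySem.Chars.startswith t pvList then
    pvGoA (PySem.Chars.slice t (some 5) (some (-1)))
  else if h3 : PySem.Chars.startswith t pvReq then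
    pvGoA (PySem.Chars.slice t (some 9) (some (-1)))
  else [String.ofList t]
termination_by s.length
decreasing_by
  all_goals
    simp only [PySem.Chars.slice_eq_listSlice]
  · have hp := (PySem.Chars.startswith_iff _ _).mp h1
    have hlen : 0 < t.length := by
      have := hp.length_le; simp [pvOpt] at this; omega
    exact lt_of_lt_of_le (pvSliceLt _ _ hlen) (pvStripLe s)
  · have hp := (PySem.Chars.startswith_iff _ _).mp h2
    have hlen : 0 < t.length := by
      have := hp.length_le; simp [pvList] at this; omega
    exact lt_of_lt_of_le (pvSliceLt _ _ hlen) (pvStripLe s)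
  · have hp := (PySem.Chars.startswith_iff _ _).mp h3
    have hlen : 0 < t.length := by
      have := hp.length_le; simp [pvReq] at this; omega
    exact lt_of_lt_of_le (pvSliceLt _ _ hlen) (pvStripLe s)

def extract_custom_type_names_py (type_str : String) : List String :=
  pvGoA type_str.toList

-- ===== PORT B =====
-- B's wrapper table: prefix -> number of characters to cut before the trailing ')'
def pvWrappersB : List (List Char × Int) := [(pvOpt, 9), (pvList, 5), (pvReq, 9)]

-- B's while-loop, state = the current (already stripped) string t
def pvGoB (t : List Char) : List String :=
  if pvBuiltinA.contains t then []
  else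
    match h : pvWrappersB.find? (fun pn => PySem.Chars.startswith t pn.1) with
    | some pn => pvGoB (PySem.Chars.strip (PySem.Chars.slice t (some pn.2) (some (-1))))
    | none => [String.ofList t]
termination_by t.length
decreasing_by
  have hsw := List.find?_some h
  have hmem := List.mem_of_find?_eq_some h
  have hp := (PySem.Chars.startswith_iff _ _).mp hsw
  have hlen : 0 < t.length := by
    have hne : pn.1 ≠ [] := by
      fin_cases hmem <;> simp [pvOpt, pvList, pvReq]
    have := hp.length_le
    cases hpn : pn.1 with
    | nil => exact absurd hpn hne
    | cons a l => rw [hpn] at this; simp at this; omega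
  calc (PySem.Chars.strip (PySem.Chars.slice t (some pn.2) (some (-1)))).length
      ≤ (PySem.Chars.slice t (some pn.2) (some (-1))).length := pvStripLe _
    _ < t.length := by
        simp only [PySem.Chars.slice_eq_listSlice]; exact pvSliceLt _ _ hlen

def extract_custom_type_names_py_alt (type_str : String) : List String :=
  pvGoB (PySem.Chars.strip type_str.toList)

-- ===== PRECONDITION & SPEC =====
def Spec_extract_custom_type_names_py (type_str : String) (out : List String) : Prop := out = extract_custom_type_names_py_alt type_str
instance (type_str : String) (out : List String) : Decidable (Spec_extract_custom_type_names_py type_str out) := by unfold Spec_extract_custom_type_names_py; infer_instance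

-- ===== CLAIM (what is proved, stated in full; the proofs are below) =====
def Claim_equal_extract_custom_type_names_py : Prop := ∀ (type_str : String), Dom_extract_custom_type_names_py type_str → Spec_extract_custom_type_names_py type_str (extract_custom_type_names_py type_str)

-- ===== LEMMAS AND PROOFS =====
theorem pvWrappersB_eq : pvWrappersB = (pvOpt, (9:Int)) :: (pvList, 5) :: (pvReq, 9) :: [] := rfl

theorem pvGoA_eq_goB_strip : ∀ (n : Nat) (s : List Char), s.length ≤ n →
    pvGoA s = pvGoB (PySem.Chars.strip s) := by
  intro n
  induction n with
  | zero =>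
    intro s hs
    have hnil : s = [] := List.eq_nil_of_length_eq_zero (by omega)
    subst hnil
    rw [pvGoA, pvGoB]
    have hf : pvWrappersB.find?
        (fun pn => PySem.Chars.startswith (PySem.Chars.strip []) pn.1) = none := by decide
    have hb : ¬ (pvBuiltinA.contains (PySem.Chars.strip []) = true) := by decide
    rw [if_neg hb, if_neg hb, dif_neg (show ¬ (PySem.Chars.startswith (PySem.Chars.strip []) pvOpt = true) by decide),
        dif_neg (show ¬ (PySem.Chars.startswith (PySem.Chars.strip []) pvList = true) by decide),
        dif_neg (show ¬ (PySem.Chars.startswith (PySem.Chars.strip []) pvReq = true) by decide)]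
    split
    next pn hfind => rw [hf] at hfind; exact absurd hfind (by simp)
    next => rfl
  | succ n ih =>
    intro s hs
    rw [pvGoA, pvGoB]
    have hstriple := pvStripLe s
    by_cases hb : pvBuiltinA.contains (PySem.Chars.strip s) = true
    · rw [if_pos hb, if_pos hb]
    · rw [if_neg hb, if_neg hb]
      by_cases h1 : PySem.Chars.startswith (PySem.Chars.strip s) pvOpt = true
      · have hf : pvWrappersB.find?
            (fun pn => PySem.Chars.startswith (PySem.Chars.strip s) pn.1)
            = some (pvOpt, 9) := by
          rw [pvWrappersB_eq, List.find?_cons_of_pos (by simpa using h1)]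
        have hlen : 0 < (PySem.Chars.strip s).length := by
          have := ((PySem.Chars.startswith_iff _ _).mp h1).length_le
          simp [pvOpt] at this; omega
        rw [dif_pos h1]
        split
        next pn hfind =>
          rw [hf] at hfind
          injection hfind with h
          subst h
          apply ih
          have := pvSliceLt (PySem.Chars.strip s) 9 hlen
          simp only [PySem.Chars.slice_eq_listSlice]
          omega
        next hfind => rw [hf] at hfind; exact absurd hfind (by simp)
      · by_cases h2 : PySem.Chars.startswith (PySem.Chars.strip s) pvList = true
        · have hf : pvWrappersB.find?
              (fun pn => PySem.Chars.startswith (PySem.Chars.strip s) pn.1)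
              = some (pvList, 5) := by
            rw [pvWrappersB_eq, List.find?_cons_of_neg (by simpa using h1),
                List.find?_cons_of_pos (by simpa using h2)]
          have hlen : 0 < (PySem.Chars.strip s).length := by
            have := ((PySem.Chars.startswith_iff _ _).mp h2).length_le
            simp [pvList] at this; omega
          rw [dif_neg h1, dif_pos h2]
          split
          next pn hfind =>
            rw [hf] at hfind
            injection hfind with h
            subst h
            apply ih
            have := pvSliceLt (PySem.Chars.strip s) 5 hlen
            simp only [PySem.Chars.slice_eq_listSlice]
            omega
          next hfind => rw [hf] at hfind; exact absurd hfind (by simp)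
        · by_cases h3 : PySem.Chars.startswith (PySem.Chars.strip s) pvReq = true
          · have hf : pvWrappersB.find?
                (fun pn => PySem.Chars.startswith (PySem.Chars.strip s) pn.1)
                = some (pvReq, 9) := by
              rw [pvWrappersB_eq, List.find?_cons_of_neg (by simpa using h1),
                  List.find?_cons_of_neg (by simpa using h2),
                  List.find?_cons_of_pos (by simpa using h3)]
            have hlen : 0 < (PySem.Chars.strip s).length := by
              have := ((PySem.Chars.startswith_iff _ _).mp h3).length_le
              simp [pvReq] at this; omega
            rw [dif_neg h1, dif_neg h2, dif_pos h3]
            split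
            next pn hfind =>
              rw [hf] at hfind
              injection hfind with h
              subst h
              apply ih
              have := pvSliceLt (PySem.Chars.strip s) 9 hlen
              simp only [PySem.Chars.slice_eq_listSlice]
              omega
            next hfind => rw [hf] at hfind; exact absurd hfind (by simp)
          · have hf : pvWrappersB.find?
                (fun pn => PySem.Chars.startswith (PySem.Chars.strip s) pn.1)
                = none := by
              rw [pvWrappersB_eq, List.find?_cons_of_neg (by simpa using h1),
                  List.find?_cons_of_neg (by simpa using h2),
                  List.find?_cons_of_neg (by simpa using h3), List.find?_nil]
            rw [dif_neg h1, dif_neg h2, dif_neg h3]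
            split
            next pn hfind => rw [hf] at hfind; exact absurd hfind (by simp)
            next hfind => rfl

-- ===== VERDICT (by name: the statement is the Claim_ definition above) =====
theorem extract_custom_type_names_py_spec : Claim_equal_extract_custom_type_names_py := by
  intro type_str _
  unfold Spec_extract_custom_type_names_py extract_custom_type_names_py extract_custom_type_names_py_alt
  exact pvGoA_eq_goB_strip type_str.toList.length type_str.toList le_rfl
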